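-- pv_equiv track=rewrite | github.com/gerrowadat/adventofcode | 2019/1/2_test.py | fuel_needed
-- ===== SOURCE A (Python) =====
-- import math
--
-- def fuel_needed(mass):
--     fuel = math.floor(mass/3) - 2
--     if fuel <= 0:
--        return 0
--     fuel_for_fuel = fuel_needed(fuel)
--     if fuel_for_fuel <= 0:
--       return fuel
--     return fuel + fuel_for_fuel
-- ===== SOURCE B (Python) =====
-- def fuel_needed(mass):
--     # Build the chain of successive fuel amounts, then sum it.
--     chain = []
--     f = mass // 3 - 2
--     while f > 0:
--         chain.append(f)
--         f = f // 3 - 2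
--     return sum(chain)
-- ===== Notes on version B (the rewrite author's own statement) =====
-- stated objective: alternative
-- what changed: Replaces the branch-heavy recursion over the fuel chain by explicitly materialising the chain of successive fuel amounts with a while loop and returning its sum.
import Mathlib
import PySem

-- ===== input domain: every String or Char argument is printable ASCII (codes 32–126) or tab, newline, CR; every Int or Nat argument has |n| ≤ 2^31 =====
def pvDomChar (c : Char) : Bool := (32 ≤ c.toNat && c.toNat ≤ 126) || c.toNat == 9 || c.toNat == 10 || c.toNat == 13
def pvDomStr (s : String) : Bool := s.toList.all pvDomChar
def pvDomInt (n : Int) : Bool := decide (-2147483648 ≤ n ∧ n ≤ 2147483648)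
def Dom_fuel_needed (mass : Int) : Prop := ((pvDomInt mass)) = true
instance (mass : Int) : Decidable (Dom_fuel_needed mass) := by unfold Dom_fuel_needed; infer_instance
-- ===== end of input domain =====

-- B materialises the chain of successive fuel amounts as a list and sums it, instead of A's recursion (alternative decomposition, same values).
-- Both ports carry a Nat counter solely as a totality guard (the chain value strictly shrinks, so mass.toNat + 1 steps suffice).

-- ===== PORT A =====
-- math.floor(mass/3) on ints |mass| ≤ 2^31 equals floor division by 3 exactly (floats are exact below 2^53): PySem.Int.floordiv.
def fuelNeededA : Nat → Int → Int
  | 0, _ => 0      -- never reached when the counter starts at mass.toNat + 1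
  | n + 1, mass =>
    let fuel := PySem.Int.floordiv mass 3 - 2
    if fuel ≤ 0 then 0
    else
      let fuel_for_fuel := fuelNeededA n fuel
      if fuel_for_fuel ≤ 0 then fuel else fuel + fuel_for_fuel

def fuel_needed (mass : Int) : Int := fuelNeededA (mass.toNat + 1) mass

-- ===== PORT B =====
-- the while loop of Source B producing the chain list (state: current value f)
def fuelChainB : Nat → Int → List Int
  | 0, _ => []      -- never reached when the counter starts at mass.toNat + 1
  | n + 1, f =>
    if 0 < f then f :: fuelChainB n (PySem.Int.floordiv f 3 - 2)
    else []

def fuel_needed_alt (mass : Int) : Int :=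
  (fuelChainB (mass.toNat + 1) (PySem.Int.floordiv mass 3 - 2)).sum

-- ===== PRECONDITION & SPEC =====
def Spec_fuel_needed (mass : Int) (out : Int) : Prop := out = fuel_needed_alt mass
instance (mass : Int) (out : Int) : Decidable (Spec_fuel_needed mass out) := by unfold Spec_fuel_needed; infer_instance

-- ===== CLAIM (what is proved, stated in full; the proofs are below) =====
def Claim_equal_fuel_needed : Prop := ∀ (mass : Int), Dom_fuel_needed mass → Spec_fuel_needed mass (fuel_needed mass)

-- ===== LEMMAS AND PROOFS =====

-- the next value in the chain is strictly smaller (as a Nat) whenever the chain continues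
theorem fuel_step_lt (c : Int) (h : 0 < PySem.Int.floordiv c 3 - 2) :
    (PySem.Int.floordiv c 3 - 2).toNat < c.toNat := by
  have e : PySem.Int.floordiv c 3 = c / 3 := PySem.Int.floordiv_eq_ediv_of_pos (by norm_num)
  omega

theorem fuelNeededA_nonneg (n : Nat) (mass : Int) : 0 ≤ fuelNeededA n mass := by
  induction n generalizing mass with
  | zero => exact le_refl 0
  | succ n ih =>
    simp only [fuelNeededA]
    split
    · exact le_refl 0
    · split <;> omega

-- the sum of B's chain list equals A's recursive total
theorem fuelChainB_sum (n : Nat) (mass : Int) (hn : mass.toNat < n) :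
    (fuelChainB n (PySem.Int.floordiv mass 3 - 2)).sum = fuelNeededA n mass := by
  induction n generalizing mass with
  | zero => omega
  | succ n ih =>
    simp only [fuelChainB, fuelNeededA]
    by_cases h : 0 < PySem.Int.floordiv mass 3 - 2
    · have hlt := fuel_step_lt mass h
      rw [if_pos h, if_neg (by omega)]
      have hrec := ih (PySem.Int.floordiv mass 3 - 2) (by omega)
      have h0 := fuelNeededA_nonneg n (PySem.Int.floordiv mass 3 - 2)
      simp only [List.sum_cons, hrec]
      split <;> omega
    · rw [if_neg h, if_pos (by omega)]
      rfl

-- ===== VERDICT (by name: the statement is the Claim_ definition above) =====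
theorem fuel_needed_spec : Claim_equal_fuel_needed := by
  intro mass _
  unfold Spec_fuel_needed fuel_needed_alt fuel_needed
  exact (fuelChainB_sum (mass.toNat + 1) mass (by omega)).symm
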